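-- pv_equiv track=rewrite | github.com/pranvil/SIM_APDU_Parser | parsers/esim/tlvs/parse_bf2d.py | _decode_taglist_hex
-- ===== SOURCE A (Python) =====
-- def _decode_taglist_hex(taglist_hex: str):
--     s = taglist_hex.upper().replace(" ", "")
--     idx = 0; n = len(s); out = []
--
--     # Tag meaning mapping
--     tag_meaning_map = {
--         "5A": "ICCID",
--         "90": "profileNickname",
--         "91": "serviceProviderName",
--         "92": "profileName",
--         "93": "iconType",
--         "94": "icon",
--         "95": "profileClass",
--         "B6": "notificationConfigurationInfo",
--         "B7": "profileOwner",
--         "B8": "dpProprietaryData",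
--         "99": "profilePolicyRules",
--         "9F70": "profileState",
--         "BF76": "BF76 (unknown/vendor-specific)",
--     }
--
--     while idx < n:
--         if idx+2>n: break
--         t1 = s[idx:idx+2]; idx += 2
--         if t1 in ("9F","BF","5F","7F") and idx+2<=n:
--             t2 = s[idx:idx+2]; idx += 2
--             tag = t1+t2
--         else:
--             tag = t1
--         meaning = tag_meaning_map.get(tag, "Unknown")
--         out.append((tag, meaning))
--     return out
-- ===== SOURCE B (Python) =====
-- import re
--
-- _TAG_MEANING_MAP = {
--     "5A": "ICCID",
--     "90": "profileNickname",
--     "91": "serviceProviderName",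
--     "92": "profileName",
--     "93": "iconType",
--     "94": "icon",
--     "95": "profileClass",
--     "B6": "notificationConfigurationInfo",
--     "B7": "profileOwner",
--     "B8": "dpProprietaryData",
--     "99": "profilePolicyRules",
--     "9F70": "profileState",
--     "BF76": "BF76 (unknown/vendor-specific)",
-- }
--
-- _TOKEN_RE = re.compile(r"(?s)(?:9F|BF|5F|7F)..|..")
--
-- def _decode_taglist_hex(taglist_hex: str):
--     s = taglist_hex.upper().replace(" ", "")
--     return [(t, _TAG_MEANING_MAP.get(t, "Unknown")) for t in _TOKEN_RE.findall(s)]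
-- ===== Notes on version B (the rewrite author's own statement) =====
-- stated objective: idiomatic
-- what changed: Replaces the manual index/slice while-loop with a single compiled-regex tokenization (findall of a marker-pair-or-any-byte pattern with DOTALL) followed by a lookup comprehension over the tokens.
import Mathlib
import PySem

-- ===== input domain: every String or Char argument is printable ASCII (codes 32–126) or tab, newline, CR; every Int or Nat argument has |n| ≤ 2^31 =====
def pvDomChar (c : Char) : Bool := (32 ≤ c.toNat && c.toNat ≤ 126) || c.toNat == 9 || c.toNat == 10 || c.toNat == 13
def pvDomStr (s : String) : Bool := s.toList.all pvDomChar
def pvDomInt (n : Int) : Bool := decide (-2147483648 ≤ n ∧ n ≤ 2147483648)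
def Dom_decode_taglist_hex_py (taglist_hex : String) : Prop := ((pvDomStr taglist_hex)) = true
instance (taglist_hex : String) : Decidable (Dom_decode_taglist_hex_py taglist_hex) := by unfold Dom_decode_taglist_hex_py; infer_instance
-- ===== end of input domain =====

-- B replaces A's manual index-and-slice while-loop by a one-pass regex tokenizer
-- (re.findall of '(?s)(?:9F|BF|5F|7F)..|..') followed by a lookup comprehension (objective: idiomatic).
-- The shared tag-meaning table (plain data, identical in both sources).
def pvTagMap : PySem.Dict String String := PySem.Dict.ofList
  [("5A", "ICCID"),
   ("90", "profileNickname"),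
   ("91", "serviceProviderName"),
   ("92", "profileName"),
   ("93", "iconType"),
   ("94", "icon"),
   ("95", "profileClass"),
   ("B6", "notificationConfigurationInfo"),
   ("B7", "profileOwner"),
   ("B8", "dpProprietaryData"),
   ("99", "profilePolicyRules"),
   ("9F70", "profileState"),
   ("BF76", "BF76 (unknown/vendor-specific)")]

-- ===== PORT A =====
-- the while-loop of A: state is the index idx into the fixed string s of length n
def pvLoopA (s : List Char) (n : Nat) (idx : Nat) : List (String × String) :=
  if _h : idx < n then
    if idx + 2 > n then []
    else
      -- t1 = s[idx:idx+2]; idx += 2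
      let t1 := PySem.List.slice s (some (idx : Int)) (some ((idx : Int) + 2))
      let idx1 := idx + 2
      if (t1 = ['9','F'] ∨ t1 = ['B','F'] ∨ t1 = ['5','F'] ∨ t1 = ['7','F']) ∧ idx1 + 2 ≤ n then
        -- t2 = s[idx:idx+2]; idx += 2; tag = t1+t2
        let t2 := PySem.List.slice s (some (idx1 : Int)) (some ((idx1 : Int) + 2))
        let tag := String.ofList (t1 ++ t2)
        (tag, pvTagMap.getD tag "Unknown") :: pvLoopA s n (idx1 + 2)
      else
        let tag := String.ofList t1
        (tag, pvTagMap.getD tag "Unknown") :: pvLoopA s n idx1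
  else []
termination_by n - idx

def decode_taglist_hex_py (taglist_hex : String) : List (String × String) :=
  -- s = taglist_hex.upper().replace(" ", "")
  let s := PySem.Chars.replace (PySem.Chars.upper taglist_hex.toList) [' '] []
  pvLoopA s s.length 0

-- ===== PORT B =====
-- hand port (exact, step for step) of re.findall(r"(?s)(?:9F|BF|5F|7F)..|..", s):
-- at each position the first alternative (marker byte + any two chars) is tried, then '..';
-- with fewer than two chars left nothing matches and the scan ends.
def pvTokenize : List Char → List (List Char)
  | a :: b :: c :: d :: rest' =>
    if [a, b] = ['9','F'] ∨ [a, b] = ['B','F'] ∨ [a, b] = ['5','F'] ∨ [a, b] = ['7','F'] then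
      [a, b, c, d] :: pvTokenize rest'
    else [a, b] :: pvTokenize (c :: d :: rest')
  | a :: b :: rest => [a, b] :: pvTokenize rest
  | _ => []

def decode_taglist_hex_py_alt (taglist_hex : String) : List (String × String) :=
  let s := PySem.Chars.replace (PySem.Chars.upper taglist_hex.toList) [' '] []
  (pvTokenize s).map (fun t =>
    let tag := String.ofList t
    (tag, pvTagMap.getD tag "Unknown"))

-- ===== PRECONDITION & SPEC =====
def Spec_decode_taglist_hex_py (taglist_hex : String) (out : List (String × String)) : Prop := out = decode_taglist_hex_py_alt taglist_hex
instance (taglist_hex : String) (out : List (String × String)) : Decidable (Spec_decode_taglist_hex_py taglist_hex out) := by unfold Spec_decode_taglist_hex_py; infer_instance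

-- ===== CLAIM (what is proved, stated in full; the proofs are below) =====
def Claim_equal_decode_taglist_hex_py : Prop := ∀ (taglist_hex : String), Dom_decode_taglist_hex_py taglist_hex → Spec_decode_taglist_hex_py taglist_hex (decode_taglist_hex_py taglist_hex)

-- ===== LEMMAS AND PROOFS =====
-- a two-char token with no marker is emitted whole, whatever follows
lemma pvTokenize_not_marker (a b : Char) (rest : List Char)
    (hm : ¬ ([a, b] = ['9','F'] ∨ [a, b] = ['B','F'] ∨ [a, b] = ['5','F'] ∨ [a, b] = ['7','F'])) :
    pvTokenize (a :: b :: rest) = [a, b] :: pvTokenize rest := by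
  match rest with
  | c :: d :: rest' => rw [pvTokenize, if_neg hm]
  | [] => rfl
  | [c] => rfl

-- the loop of A, started at index idx, computes B's map-over-tokens of the suffix s.drop idx
lemma pvLoopA_eq_tokenize (s : List Char) (idx : Nat) :
    pvLoopA s s.length idx =
      (pvTokenize (s.drop idx)).map (fun t =>
        (String.ofList t, pvTagMap.getD (String.ofList t) "Unknown")) := by
  rw [pvLoopA]
  split
  · rename_i hlt
    split
    · rename_i h2
      -- idx < length, idx + 2 > length : exactly one char remains
      have : (s.drop idx).length = 1 := by simp; omega
      obtain ⟨a, ha⟩ := List.length_eq_one_iff.mp this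
      rw [ha]; rfl
    · rename_i h2
      have h2' : idx + 2 ≤ s.length := by omega
      have hlen : 2 ≤ (s.drop idx).length := by simp; omega
      obtain ⟨a, b, rest, hd⟩ : ∃ a b rest, s.drop idx = a :: b :: rest := by
        rcases h : s.drop idx with _ | ⟨a, t⟩
        · rw [h] at hlen; simp at hlen
        · rcases t with _ | ⟨b, rest⟩
          · rw [h] at hlen; simp at hlen
          · exact ⟨a, b, rest, rfl⟩
      have ht1 : PySem.List.slice s (some (idx : Int)) (some ((idx : Int) + 2)) = [a, b] := by
        have := PySem.List.slice_natCast_add s idx 2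
        simp only [Nat.cast_ofNat] at this
        rw [this, hd]; rfl
      have hrest : s.drop (idx + 2) = rest := by
        rw [← List.drop_drop, hd]; rfl
      have hrl : rest.length = s.length - (idx + 2) := by
        have h := congrArg List.length hrest
        simp at h; omega
      rw [ht1, hd]
      by_cases hm : [a, b] = ['9','F'] ∨ [a, b] = ['B','F'] ∨ [a, b] = ['5','F'] ∨ [a, b] = ['7','F']
      · by_cases h4 : idx + 2 + 2 ≤ s.length
        · -- marker with two more chars available: 4-char token
          obtain ⟨c, d, rest', hr⟩ : ∃ c d rest', rest = c :: d :: rest' := by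
            rcases rest with _ | ⟨c, t⟩
            · simp at hrl; omega
            · rcases t with _ | ⟨d, rest'⟩
              · simp at hrl; omega
              · exact ⟨c, d, rest', rfl⟩
          have ht2 : PySem.List.slice s (some ((idx : Int) + 2)) (some ((idx : Int) + 2 + 2)) = [c, d] := by
            have := PySem.List.slice_natCast_add s (idx + 2) 2
            simp only [Nat.cast_ofNat] at this
            push_cast at this
            rw [this, hrest, hr]; rfl
          rw [if_pos ⟨hm, h4⟩]
          have hrest' : s.drop (idx + 2 + 2) = rest' := by
            rw [← List.drop_drop, hrest, hr]; rfl
          have hcast : ((idx + 2 : Nat) : Int) = (idx : Int) + 2 := by push_cast; ring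
          rw [hcast, ht2]
          rw [pvLoopA_eq_tokenize s (idx + 2 + 2), hrest', hr, pvTokenize, if_pos hm]
          rfl
        · -- marker but fewer than two chars after it: plain 2-char token
          rw [if_neg (by omega : ¬ ((_ ∨ _ ∨ _ ∨ _) ∧ idx + 2 + 2 ≤ s.length))]
          rw [pvLoopA_eq_tokenize s (idx + 2), hrest]
          rcases rest with _ | ⟨c, t⟩
          · rfl
          · rcases t with _ | ⟨d, rest'⟩
            · rfl
            · simp at hrl; omega
      · rw [if_neg (by tauto)]
        rw [pvLoopA_eq_tokenize s (idx + 2), hrest, pvTokenize_not_marker a b rest hm]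
        rfl
  · rename_i hge
    have : s.drop idx = [] := List.drop_eq_nil_of_le (by omega)
    rw [this]; rfl
termination_by s.length - idx
decreasing_by all_goals omega

-- ===== VERDICT (by name: the statement is the Claim_ definition above) =====
theorem decode_taglist_hex_py_spec : Claim_equal_decode_taglist_hex_py := by
  intro taglist_hex _
  unfold Spec_decode_taglist_hex_py decode_taglist_hex_py decode_taglist_hex_py_alt
  simpa using pvLoopA_eq_tokenize _ 0
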